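-- pv_equiv track=rewrite | github.com/DariaGazkaeva/oip-search | task_3/search.py | validate_query_depth_1
-- ===== SOURCE A (Python) =====
-- from typing import Any
--
-- def validate_query_depth_1(query: list[str, Any]) -> bool:
--     for i in range(len(query)):
--         # validate OR and AND
--         if query[i] in ["AND", "OR"]:
--             if i == 0 or i == len(query) - 1:
--                 return False
--             if query[i - 1] in ["AND", "OR", "NOT"]:
--                 return False
--             if query[i + 1] in ["AND", "OR"]:
--                 return False
--
--         # validate NOT
--         elif query[i] == "NOT":
--             if i == len(query) - 1:
--                 return False
--             if query[i + 1] in ["AND", "OR"]: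
--                 return False
--
--         # validate subexpression
--         else:
--             if i < len(query) - 1 and query[i] in ["AND", "OR"]:
--                 return False
--
--     return True
-- ===== SOURCE B (Python) =====
-- def validate_query_depth_1(query):
--     # Table-driven finite automaton over token classes:
--     # B = binary operator, N = NOT, W = word/term;
--     # states: S start, T after term, N after NOT, O after binary op, R reject.
--     def cls(t):
--         if t in ("AND", "OR"):
--             return "B"
--         if t == "NOT":
--             return "N"
--         return "W"
--     trans = {
--         ("S", "W"): "T", ("S", "N"): "N", ("S", "B"): "R",
--         ("T", "W"): "T", ("T", "N"): "N", ("T", "B"): "O",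
--         ("N", "W"): "T", ("N", "N"): "N", ("N", "B"): "R",
--         ("O", "W"): "T", ("O", "N"): "N", ("O", "B"): "R",
--         ("R", "W"): "R", ("R", "N"): "R", ("R", "B"): "R",
--     }
--     state = "S"
--     for t in query:
--         state = trans[(state, cls(t))]
--     return state in ("S", "T")
-- ===== Notes on version B (the rewrite author's own statement) =====
-- stated objective: alternative
-- what changed: Replaces A's per-index branchy scan (with i-1/i+1 lookarounds and early returns) by a table-driven finite automaton: tokens are classified into {binary-op, NOT, word}, a 5-state transition table (a dict) is folded over the token stream, and validity is acceptance of the final state.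
import Mathlib
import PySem

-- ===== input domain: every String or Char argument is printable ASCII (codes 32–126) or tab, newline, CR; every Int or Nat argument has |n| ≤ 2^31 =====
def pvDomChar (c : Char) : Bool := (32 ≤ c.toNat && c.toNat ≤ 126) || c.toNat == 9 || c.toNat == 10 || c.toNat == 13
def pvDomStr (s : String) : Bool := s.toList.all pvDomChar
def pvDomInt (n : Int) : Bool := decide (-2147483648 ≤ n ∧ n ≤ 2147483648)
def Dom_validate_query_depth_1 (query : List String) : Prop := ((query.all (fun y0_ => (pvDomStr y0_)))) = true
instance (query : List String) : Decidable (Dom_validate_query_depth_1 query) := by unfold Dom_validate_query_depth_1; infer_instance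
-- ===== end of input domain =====

-- B replaces A's per-index lookaround branching by a table-driven 5-state finite automaton
-- folded over the token stream (objective: alternative algorithm, same O(n) cost).


-- ===== PORT A =====
-- literal port of A's `for i in range(len(query))` loop with early returns; membership in a
-- literal list (`x in ["AND","OR"]`) is ported as the disjunction of equalities; every indexed
-- access is in range where it is evaluated (the preceding guards ensure it), so `[·]?.getD ""`
-- is exact there.
def validate_query_depth_1_go (query : List String) (i : Nat) : Bool :=
  if i < query.length then
    if query[i]?.getD "" = "AND" || query[i]?.getD "" = "OR" then
      if i = 0 || i = query.length - 1 then false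
      else if query[i-1]?.getD "" = "AND" || query[i-1]?.getD "" = "OR" || query[i-1]?.getD "" = "NOT" then false
      else if query[i+1]?.getD "" = "AND" || query[i+1]?.getD "" = "OR" then false
      else validate_query_depth_1_go query (i+1)
    else if query[i]?.getD "" = "NOT" then
      if i = query.length - 1 then false
      else if query[i+1]?.getD "" = "AND" || query[i+1]?.getD "" = "OR" then false
      else validate_query_depth_1_go query (i+1)
    else
      if decide (i < query.length - 1) && (query[i]?.getD "" = "AND" || query[i]?.getD "" = "OR") then false
      else validate_query_depth_1_go query (i+1)
  else true
termination_by query.length - i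
decreasing_by all_goals omega

def validate_query_depth_1 (query : List String) : Bool :=
  validate_query_depth_1_go query 0

-- ===== PORT B =====
-- Source B's token classifier: "B" = binary operator, "N" = NOT, "W" = word/term
def pvClsFn (t : String) : String :=
  if t = "AND" || t = "OR" then "B" else if t = "NOT" then "N" else "W"

-- Source B's transition table (a Python dict literal); states: S start, T after term,
-- N after NOT, O after binary op, R reject
def pvTransDict : PySem.Dict (String × String) String :=
  PySem.Dict.ofList
    [ (("S", "W"), "T"), (("S", "N"), "N"), (("S", "B"), "R"),
      (("T", "W"), "T"), (("T", "N"), "N"), (("T", "B"), "O"),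
      (("N", "W"), "T"), (("N", "N"), "N"), (("N", "B"), "R"),
      (("O", "W"), "T"), (("O", "N"), "N"), (("O", "B"), "R"),
      (("R", "W"), "R"), (("R", "N"), "R"), (("R", "B"), "R") ]

-- Source B's `trans[(state, cls(t))]` raises KeyError on a missing key; the table covers every
-- (state, class) pair that can arise, so `.getD "R"` is exact here.
def validate_query_depth_1_alt (query : List String) : Bool :=
  let final := query.foldl (fun s t => (PySem.Dict.get? pvTransDict (s, pvClsFn t)).getD "R") "S"
  final = "S" || final = "T"

-- ===== PRECONDITION & SPEC =====
def Spec_validate_query_depth_1 (query : List String) (out : Bool) : Prop := out = validate_query_depth_1_alt query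
instance (query : List String) (out : Bool) : Decidable (Spec_validate_query_depth_1 query out) := by unfold Spec_validate_query_depth_1; infer_instance

-- ===== CLAIM (what is proved, stated in full; the proofs are below) =====
def Claim_equal_validate_query_depth_1 : Prop := ∀ (query : List String), Dom_validate_query_depth_1 query → Spec_validate_query_depth_1 query (validate_query_depth_1 query)

-- ===== LEMMAS AND PROOFS =====

def pvStep (s t : String) : String := (PySem.Dict.get? pvTransDict (s, pvClsFn t)).getD "R"

def pvRun (s : String) (l : List String) : String := l.foldl pvStep s

def pvAccept (s : String) : Bool := s = "S" || s = "T"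

lemma alt_eq (q : List String) : validate_query_depth_1_alt q = pvAccept (pvRun "S" q) := rfl

lemma run_cons (s t : String) (l : List String) : pvRun s (t :: l) = pvRun (pvStep s t) l := rfl

-- the automaton state corresponding to "previous token was t"
def pvStOf (t : String) : String :=
  if t = "AND" || t = "OR" then "O" else if t = "NOT" then "N" else "T"

lemma cls_bin {t : String} (h : (t = "AND" || t = "OR") = true) : pvClsFn t = "B" := by
  simp only [pvClsFn, h]; rfl

lemma cls_not {t : String} (hb : ¬((t = "AND" || t = "OR") = true)) (hn : t = "NOT") :
    pvClsFn t = "N" := by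
  simp only [pvClsFn]
  rw [if_neg (by simpa using hb), if_pos (by simpa using hn)]

lemma cls_word {t : String} (hb : ¬((t = "AND" || t = "OR") = true)) (hn : ¬(t = "NOT")) :
    pvClsFn t = "W" := by
  simp only [pvClsFn]
  rw [if_neg (by simpa using hb), if_neg (by simpa using hn)]

lemma cls_cases (t : String) : pvClsFn t = "B" ∨ pvClsFn t = "N" ∨ pvClsFn t = "W" := by
  unfold pvClsFn; split_ifs <;> simp

lemma stOf_cases (p : String) : pvStOf p = "O" ∨ pvStOf p = "N" ∨ pvStOf p = "T" := by
  unfold pvStOf; split_ifs <;> simp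

lemma stOf_bin {p : String} (h : (p = "AND" || p = "OR") = true) : pvStOf p = "O" := by
  simp only [pvStOf, h]; rfl

lemma stOf_op {p : String} (h : (p = "AND" || p = "OR" || p = "NOT") = true) :
    pvStOf p = "O" ∨ pvStOf p = "N" := by
  by_cases hb : (p = "AND" || p = "OR") = true
  · exact Or.inl (stOf_bin hb)
  · have hn : p = "NOT" := by
      simp only [Bool.or_eq_true, decide_eq_true_eq] at h hb
      tauto
    right
    simp only [pvStOf]
    rw [if_neg (by simpa using hb), if_pos (by simpa using hn)]

lemma stOf_nonop {p : String} (h : ¬((p = "AND" || p = "OR" || p = "NOT") = true)) :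
    pvStOf p = "T" := by
  simp only [Bool.or_eq_true, decide_eq_true_eq, not_or] at h
  obtain ⟨⟨h1, h2⟩, h3⟩ := h
  simp only [pvStOf]
  rw [if_neg (by simp [h1, h2]), if_neg (by simpa using h3)]

lemma stOf_notbin_not {p : String} (hb : ¬((p = "AND" || p = "OR") = true)) (hn : p = "NOT") :
    pvStOf p = "N" := by
  simp only [pvStOf]
  rw [if_neg (by simpa using hb), if_pos (by simpa using hn)]

lemma stOf_word {p : String} (hb : ¬((p = "AND" || p = "OR") = true)) (hn : ¬(p = "NOT")) :
    pvStOf p = "T" := by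
  simp only [pvStOf]
  rw [if_neg (by simpa using hb), if_neg (by simpa using hn)]

-- transition-table evaluations
lemma step_B_S {t : String} (hc : pvClsFn t = "B") : pvStep "S" t = "R" := by
  simp only [pvStep, hc]; decide

lemma step_B_T {t : String} (hc : pvClsFn t = "B") : pvStep "T" t = "O" := by
  simp only [pvStep, hc]; decide

lemma step_B_NO {s t : String} (hs : s = "N" ∨ s = "O") (hc : pvClsFn t = "B") :
    pvStep s t = "R" := by
  rcases hs with rfl | rfl <;> simp only [pvStep, hc] <;> decide

lemma step_N4 {s t : String} (hs : s = "S" ∨ s = "T" ∨ s = "N" ∨ s = "O")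
    (hc : pvClsFn t = "N") : pvStep s t = "N" := by
  rcases hs with rfl | rfl | rfl | rfl <;> simp only [pvStep, hc] <;> decide

lemma step_W4 {s t : String} (hs : s = "S" ∨ s = "T" ∨ s = "N" ∨ s = "O")
    (hc : pvClsFn t = "W") : pvStep s t = "T" := by
  rcases hs with rfl | rfl | rfl | rfl <;> simp only [pvStep, hc] <;> decide

lemma step_R {t : String} : pvStep "R" t = "R" := by
  rcases cls_cases t with h | h | h <;> simp only [pvStep, h] <;> decide

lemma run_R (l : List String) : pvRun "R" l = "R" := by
  induction l with
  | nil => rfl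
  | cons t ts ih => rw [run_cons, step_R, ih]

lemma drop_cons (q : List String) (i : Nat) (h : i < q.length) :
    q.drop i = (q[i]?.getD "") :: q.drop (i+1) := by
  rw [List.drop_eq_getElem_cons h, List.getElem?_eq_getElem h]
  rfl

lemma go_run (q : List String) (i : Nat) (s : String)
    (hle : i ≤ q.length)
    (hs : (i = 0 ∧ s = "S") ∨ (0 < i ∧ s = pvStOf (q[i-1]?.getD "")))
    (hend : i = q.length → s = "S" ∨ s = "T") :
    validate_query_depth_1_go q i = pvAccept (pvRun s (q.drop i)) := by
  have hs4 : s = "S" ∨ s = "T" ∨ s = "N" ∨ s = "O" := by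
    rcases hs with ⟨-, rfl⟩ | ⟨-, rfl⟩
    · exact Or.inl rfl
    · rcases stOf_cases (q[i-1]?.getD "") with h | h | h <;> rw [h] <;> tauto
  by_cases hlt : i < q.length
  · rw [validate_query_depth_1_go, if_pos hlt, drop_cons q i hlt, run_cons]
    set t := q[i]?.getD "" with ht
    by_cases hbin : (t = "AND" || t = "OR") = true
    · -- t is a binary operator
      have hcls := cls_bin hbin
      rw [if_pos hbin]
      by_cases h0 : i = 0
      · have hsS : s = "S" := by
          rcases hs with ⟨-, rfl⟩ | ⟨hpos, -⟩
          · rfl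
          · omega
        rw [if_pos (by simp [h0]), hsS, step_B_S hcls, run_R]
        rfl
      · have hsprev : s = pvStOf (q[i-1]?.getD "") := by
          rcases hs with ⟨h0', -⟩ | ⟨-, h⟩
          · exact absurd h0' h0
          · exact h
        by_cases hlast : i = q.length - 1
        · rw [if_pos (by simp [hlast])]
          have hdrop2 : q.drop (i+1) = [] := List.drop_of_length_le (by omega)
          rw [hdrop2]
          rcases stOf_cases (q[i-1]?.getD "") with h | h | h <;> rw [hsprev, h]
          · rw [step_B_NO (Or.inr rfl) hcls]; rfl
          · rw [step_B_NO (Or.inl rfl) hcls]; rfl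
          · rw [step_B_T hcls]; rfl
        · rw [if_neg (by simp [h0, hlast])]
          have hi1 : i + 1 < q.length := by omega
          by_cases hprev : (q[i-1]?.getD "" = "AND" || q[i-1]?.getD "" = "OR" || q[i-1]?.getD "" = "NOT") = true
          · have hsNO : s = "N" ∨ s = "O" :=
              (stOf_op hprev).elim (fun h => Or.inr (hsprev.trans h))
                (fun h => Or.inl (hsprev.trans h))
            rw [if_pos hprev, step_B_NO hsNO hcls, run_R]
            rfl
          · rw [if_neg hprev]
            have hsT : s = "T" := hsprev.trans (stOf_nonop hprev)
            rw [hsT, step_B_T hcls]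
            by_cases hnext : (q[i+1]?.getD "" = "AND" || q[i+1]?.getD "" = "OR") = true
            · rw [if_pos hnext, drop_cons q (i+1) hi1, run_cons,
                step_B_NO (Or.inr rfl) (cls_bin hnext), run_R]
              rfl
            · rw [if_neg hnext]
              exact go_run q (i+1) "O" (by omega)
                (Or.inr ⟨by omega, by simpa using (stOf_bin hbin).symm⟩)
                (by omega)
    · rw [if_neg hbin]
      by_cases hN : t = "NOT"
      · -- t is NOT
        have hcls := cls_not hbin hN
        rw [if_pos hN, step_N4 hs4 hcls]
        by_cases hlast : i = q.length - 1
        · rw [if_pos hlast]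
          have hdrop2 : q.drop (i+1) = [] := List.drop_of_length_le (by omega)
          rw [hdrop2]
          rfl
        · rw [if_neg hlast]
          have hi1 : i + 1 < q.length := by omega
          by_cases hnext : (q[i+1]?.getD "" = "AND" || q[i+1]?.getD "" = "OR") = true
          · rw [if_pos hnext, drop_cons q (i+1) hi1, run_cons,
              step_B_NO (Or.inl rfl) (cls_bin hnext), run_R]
            rfl
          · rw [if_neg hnext]
            exact go_run q (i+1) "N" (by omega)
              (Or.inr ⟨by omega, by simpa using (stOf_notbin_not hbin hN).symm⟩)
              (by omega)
      · -- t is a word/term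
        have hcls := cls_word hbin hN
        rw [if_neg hN, step_W4 hs4 hcls]
        rw [if_neg (by simp [hbin])]
        exact go_run q (i+1) "T" (by omega)
          (Or.inr ⟨by omega, by simpa using (stOf_word hbin hN).symm⟩)
          (fun _ => Or.inr rfl)
  · have hi : i = q.length := by omega
    rw [validate_query_depth_1_go, if_neg hlt, List.drop_of_length_le (by omega)]
    rcases hend hi with rfl | rfl <;> rfl
termination_by q.length - i
decreasing_by all_goals omega

-- ===== VERDICT (by name: the statement is the Claim_ definition above) =====
theorem validate_query_depth_1_spec : Claim_equal_validate_query_depth_1 := by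
  intro query _
  show validate_query_depth_1 query = validate_query_depth_1_alt query
  rw [validate_query_depth_1, alt_eq]
  have := go_run query 0 "S" (Nat.zero_le _) (Or.inl ⟨rfl, rfl⟩) (fun _ => Or.inl rfl)
  rwa [List.drop_zero] at this
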